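-- pv_equiv track=rewrite | github.com/pascaldisse/open-sourcefy | src/core/agents/agent08_keymaker_resource_reconstruction.py | _group_constants_into_pools
-- ===== SOURCE A (Python) =====
-- from typing import Dict, Any, List, Optional, Tuple, Set, Union
--
-- def _group_constants_into_pools(constants: List[Dict[str, Any]], pool_threshold: int = 32) -> List[List[Dict[str, Any]]]:
--     """Group nearby constants into pools based on memory proximity"""
--     if not constants:
--         return []
--
--     # Sort by memory address
--     sorted_constants = sorted(constants, key=lambda c: c['memory_address'])
--
--     pools = []
--     current_pool = [sorted_constants[0]]
--
--     for i in range(1, len(sorted_constants)):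
--         current_const = sorted_constants[i]
--         prev_const = sorted_constants[i-1]
--
--         # Check if close enough to be in same pool
--         distance = current_const['memory_address'] - (prev_const['memory_address'] + prev_const['size'])
--
--         if distance <= pool_threshold:
--             current_pool.append(current_const)
--         else:
--             # Start new pool
--             if len(current_pool) >= 2:  # Only keep pools with multiple constants
--                 pools.append(current_pool)
--             current_pool = [current_const]
--
--     # Add last pool
--     if len(current_pool) >= 2:
--         pools.append(current_pool)
--
--     return pools
-- ===== SOURCE B (Python) =====
-- def _group_constants_into_pools(constants, pool_threshold=32):
--     """Group nearby constants into pools: compute break indices, slice, filter."""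
--     s = sorted(constants, key=lambda c: c['memory_address'])
--     breaks = [i for i in range(1, len(s))
--               if s[i]['memory_address'] - (s[i - 1]['memory_address'] + s[i - 1]['size']) > pool_threshold]
--     bounds = [0] + breaks + [len(s)]
--     chunks = [s[a:b] for a, b in zip(bounds, bounds[1:])]
--     return [ch for ch in chunks if len(ch) >= 2]
-- ===== Notes on version B (the rewrite author's own statement) =====
-- stated objective: simpler
-- what changed: Replaces A's stateful accumulator loop (pools + current_pool with flush logic) by a declarative pipeline: collect the break indices where the gap exceeds the threshold, slice the sorted list at those bounds, and keep the chunks of length >= 2.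
import Mathlib
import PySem

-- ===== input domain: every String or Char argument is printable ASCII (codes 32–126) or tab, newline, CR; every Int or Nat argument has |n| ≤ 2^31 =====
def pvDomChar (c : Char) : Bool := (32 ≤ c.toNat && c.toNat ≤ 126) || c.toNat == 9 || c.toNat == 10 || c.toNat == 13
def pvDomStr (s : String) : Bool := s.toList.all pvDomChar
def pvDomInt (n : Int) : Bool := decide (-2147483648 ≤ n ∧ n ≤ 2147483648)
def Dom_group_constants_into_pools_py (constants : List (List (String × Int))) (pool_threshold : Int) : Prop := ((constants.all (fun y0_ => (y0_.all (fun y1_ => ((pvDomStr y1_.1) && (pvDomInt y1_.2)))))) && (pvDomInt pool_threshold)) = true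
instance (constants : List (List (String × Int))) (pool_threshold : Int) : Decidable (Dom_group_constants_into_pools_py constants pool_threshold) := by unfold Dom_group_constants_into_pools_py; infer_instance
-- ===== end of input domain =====

-- B replaces A's stateful pools/current_pool accumulator loop by a declarative pipeline
-- (break indices → slices → length filter); equal output, same asymptotic cost ("simpler").

-- ===== PORT A =====
-- shared transliteration of the dict accesses c['memory_address'] / c['size'] (defaults never
-- read under Pre_)
def pvKey (c : List (String × Int)) : Int := ((PySem.Dict.mk c).get? "memory_address").getD 0
def pvSize (c : List (String × Int)) : Int := ((PySem.Dict.mk c).get? "size").getD 0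

def group_constants_into_pools_py (constants : List (List (String × Int))) (pool_threshold : Int) : List (List (List (String × Int))) :=
  if constants = [] then []
  else
    let sorted_constants := PySem.List.sorted constants pvKey
    let st := (PySem.List.pyRange 1 (sorted_constants.length : Int) 1).foldl
      (fun st i =>
        let current_const := PySem.List.pyGetD sorted_constants i []
        let prev_const := PySem.List.pyGetD sorted_constants (i - 1) []
        let distance := pvKey current_const - (pvKey prev_const + pvSize prev_const)
        if distance ≤ pool_threshold then (st.1, st.2 ++ [current_const])
        else (if st.2.length ≥ 2 then st.1 ++ [st.2] else st.1, [current_const]))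
      (([] : List (List (List (String × Int)))), [PySem.List.pyGetD sorted_constants 0 []])
    if st.2.length ≥ 2 then st.1 ++ [st.2] else st.1

-- ===== PORT B =====
def group_constants_into_pools_py_alt (constants : List (List (String × Int))) (pool_threshold : Int) : List (List (List (String × Int))) :=
  let s := PySem.List.sorted constants pvKey
  let n : Int := s.length
  let breaks := (PySem.List.pyRange 1 n 1).filter (fun i =>
    decide (pvKey (PySem.List.pyGetD s i []) -
      (pvKey (PySem.List.pyGetD s (i - 1) []) + pvSize (PySem.List.pyGetD s (i - 1) [])) > pool_threshold))
  let bounds := 0 :: (breaks ++ [n])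
  let chunks := (bounds.zip (PySem.List.slice bounds (some 1) none)).map
    (fun ab => PySem.List.slice s (some ab.1) (some ab.2))
  chunks.filter (fun ch => decide (ch.length ≥ 2))

-- ===== PRECONDITION & SPEC =====
-- Pre_ holds exactly where the Python A returns (KeyError otherwise): every constant carries
-- 'memory_address', and every constant carries 'size' except possibly the one that stable-sorts
-- last (address maximal and strictly above every later element), whose 'size' is never read.
def Pre_group_constants_into_pools_py (constants : List (List (String × Int))) (pool_threshold : Int) : Prop :=
  (∀ c ∈ constants, (((PySem.Dict.mk c).get? "memory_address").isSome = true)) ∧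
  (∀ i : Fin constants.length, (((PySem.Dict.mk constants[i]).get? "size").isSome = true) ∨
     (∀ j : Fin constants.length, pvKey constants[j] ≤ pvKey constants[i] ∧ ((i : Nat) < (j : Nat) → pvKey constants[j] < pvKey constants[i])))
instance (constants : List (List (String × Int))) (pool_threshold : Int) : Decidable (Pre_group_constants_into_pools_py constants pool_threshold) := by unfold Pre_group_constants_into_pools_py; infer_instance

def pvWitness_group_constants_into_pools_py : (List (List (String × Int))) × Int :=
  ([[("memory_address", 0), ("size", 4)], [("memory_address", 100), ("size", 4)]], 32)

def Spec_group_constants_into_pools_py (constants : List (List (String × Int))) (pool_threshold : Int) (out : List (List (List (String × Int)))) : Prop := out = group_constants_into_pools_py_alt constants pool_threshold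
instance (constants : List (List (String × Int))) (pool_threshold : Int) (out : List (List (List (String × Int)))) : Decidable (Spec_group_constants_into_pools_py constants pool_threshold out) := by unfold Spec_group_constants_into_pools_py; infer_instance

-- ===== CLAIM (what is proved, stated in full; the proofs are below) =====
def Claim_equal_group_constants_into_pools_py : Prop := ∀ (constants : List (List (String × Int))) (pool_threshold : Int), Dom_group_constants_into_pools_py constants pool_threshold → Pre_group_constants_into_pools_py constants pool_threshold → Spec_group_constants_into_pools_py constants pool_threshold (group_constants_into_pools_py constants pool_threshold)

-- ===== LEMMAS AND PROOFS =====

-- the break test, shared canonical form (definitionally B's filter predicate)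
def pvBrk (s : List (List (String × Int))) (t : Int) : Int → Bool := fun i =>
  decide (pvKey (PySem.List.pyGetD s i []) -
    (pvKey (PySem.List.pyGetD s (i - 1) []) + pvSize (PySem.List.pyGetD s (i - 1) [])) > t)

-- canonical grouping: consume the remaining index list, cutting where pvBrk fires
def pvSplit (s : List (List (String × Int))) (t : Int) (cur : List (List (String × Int))) :
    List Int → List (List (List (String × Int)))
  | [] => [cur]
  | i :: r =>
      if pvBrk s t i then cur :: pvSplit s t [PySem.List.pyGetD s i []] r
      else pvSplit s t (cur ++ [PySem.List.pyGetD s i []]) r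

-- A's foldl-with-flush equals filter ∘ pvSplit
theorem pvA_loop (s : List (List (String × Int))) (t : Int) (l : List Int)
    (pools : List (List (List (String × Int)))) (cur : List (List (String × Int))) :
    (if (List.foldl (fun st i =>
          if pvKey (PySem.List.pyGetD s i []) -
              (pvKey (PySem.List.pyGetD s (i - 1) []) + pvSize (PySem.List.pyGetD s (i - 1) [])) ≤ t
          then (st.1, st.2 ++ [PySem.List.pyGetD s i []])
          else (if st.2.length ≥ 2 then st.1 ++ [st.2] else st.1, [PySem.List.pyGetD s i []])) (pools, cur) l).2.length ≥ 2
      then (List.foldl (fun st i =>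
          if pvKey (PySem.List.pyGetD s i []) -
              (pvKey (PySem.List.pyGetD s (i - 1) []) + pvSize (PySem.List.pyGetD s (i - 1) [])) ≤ t
          then (st.1, st.2 ++ [PySem.List.pyGetD s i []])
          else (if st.2.length ≥ 2 then st.1 ++ [st.2] else st.1, [PySem.List.pyGetD s i []])) (pools, cur) l).1 ++ [(List.foldl (fun st i =>
          if pvKey (PySem.List.pyGetD s i []) -
              (pvKey (PySem.List.pyGetD s (i - 1) []) + pvSize (PySem.List.pyGetD s (i - 1) [])) ≤ t
          then (st.1, st.2 ++ [PySem.List.pyGetD s i []])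
          else (if st.2.length ≥ 2 then st.1 ++ [st.2] else st.1, [PySem.List.pyGetD s i []])) (pools, cur) l).2]
      else (List.foldl (fun st i =>
          if pvKey (PySem.List.pyGetD s i []) -
              (pvKey (PySem.List.pyGetD s (i - 1) []) + pvSize (PySem.List.pyGetD s (i - 1) [])) ≤ t
          then (st.1, st.2 ++ [PySem.List.pyGetD s i []])
          else (if st.2.length ≥ 2 then st.1 ++ [st.2] else st.1, [PySem.List.pyGetD s i []])) (pools, cur) l).1)
    = pools ++ (pvSplit s t cur l).filter (fun ch => decide (ch.length ≥ 2)) := by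
  induction l generalizing pools cur with
  | nil =>
    simp only [List.foldl_nil, pvSplit, List.filter]
    by_cases h : cur.length ≥ 2 <;> simp [h]
  | cons i r ih =>
    simp only [List.foldl_cons]
    by_cases h : pvKey (PySem.List.pyGetD s i []) -
        (pvKey (PySem.List.pyGetD s (i - 1) []) + pvSize (PySem.List.pyGetD s (i - 1) [])) ≤ t
    · have hb : pvBrk s t i = false := by simp [pvBrk]; omega
      simp only [pvSplit, hb, Bool.false_eq_true, if_false, if_pos h]
      exact ih _ _
    · have hb : pvBrk s t i = true := by simp [pvBrk]; omega
      simp only [pvSplit, hb, if_true, if_neg h]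
      rw [ih]
      by_cases h2 : cur.length ≥ 2 <;>
        simp [h2, List.filter_cons, List.append_assoc]

theorem pvSlice_singleton (s : List (List (String × Int))) (j : Int)
    (h0 : 0 ≤ j) (h1 : j < (s.length : Int)) :
    PySem.List.slice s (some j) (some (j + 1)) = [PySem.List.pyGetD s j []] := by
  rw [PySem.List.slice_toNat s h0 (by omega), PySem.List.pyGetD_eq_getElem s [] h0 h1]
  have hj : j.toNat < s.length := by omega
  have h2 : (j + 1).toNat - j.toNat = 1 := by omega
  rw [h2]
  exact List.take_one_drop_eq_of_lt_length hj

theorem pvSlice_snoc (s : List (List (String × Int))) (a j : Int)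
    (h0 : 0 ≤ a) (haj : a ≤ j) (h1 : j < (s.length : Int)) :
    PySem.List.slice s (some a) (some j) ++ [PySem.List.pyGetD s j []]
      = PySem.List.slice s (some a) (some (j + 1)) := by
  rw [PySem.List.slice_toNat s h0 (by omega), PySem.List.slice_toNat s h0 (by omega),
    PySem.List.pyGetD_eq_getElem s [] (by omega) h1]
  have h2 : (j + 1).toNat - a.toNat = (j.toNat - a.toNat) + 1 := by omega
  rw [h2, List.take_add_one]
  have h3 : (List.drop a.toNat s)[j.toNat - a.toNat]? = some s[j.toNat] := by
    rw [List.getElem?_drop]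
    have : a.toNat + (j.toNat - a.toNat) = j.toNat := by omega
    rw [this, List.getElem?_eq_getElem (by omega)]
  simp [h3]

-- B's bounds/zip/slice pipeline equals pvSplit
theorem pvB_slices (s : List (List (String × Int))) (t : Int) :
    ∀ (m : Nat) (a j : Int), 0 ≤ a → a < j → j + (m : Int) = (s.length : Int) →
    ((a :: ((PySem.List.pyRange j (s.length : Int) 1).filter (pvBrk s t) ++ [(s.length : Int)])).zip
        ((PySem.List.pyRange j (s.length : Int) 1).filter (pvBrk s t) ++ [(s.length : Int)])).map
      (fun ab => PySem.List.slice s (some ab.1) (some ab.2))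
    = pvSplit s t (PySem.List.slice s (some a) (some j))
        (PySem.List.pyRange j (s.length : Int) 1) := by
  intro m
  induction m with
  | zero =>
    intro a j h0 haj hm
    have hj : j = (s.length : Int) := by omega
    subst hj
    rw [PySem.List.pyRange_one_eq_nil le_rfl]
    simp [pvSplit]
  | succ m ih =>
    intro a j h0 haj hm
    have hj : j < (s.length : Int) := by push_cast at hm ⊢; omega
    rw [PySem.List.pyRange_one_cons hj, List.filter_cons]
    by_cases hb : pvBrk s t j = true
    · simp only [hb, if_true, List.cons_append, List.zip_cons_cons, List.map_cons]
      rw [ih j (j + 1) (by omega) (by omega) (by push_cast at hm; omega)]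
      rw [pvSlice_singleton s j (by omega) hj]
      simp [pvSplit, hb]
    · simp only [hb, Bool.false_eq_true, if_false]
      rw [ih a (j + 1) h0 (by omega) (by push_cast at hm; omega)]
      rw [← pvSlice_snoc s a j h0 (by omega) hj]
      simp [pvSplit, hb]

-- ===== VERDICT (by name: the statement is the Claim_ definition above) =====
theorem group_constants_into_pools_py_spec : Claim_equal_group_constants_into_pools_py := by
  intro constants t _hdom _hpre
  unfold Spec_group_constants_into_pools_py
  unfold group_constants_into_pools_py group_constants_into_pools_py_alt
  by_cases hc : constants = []
  · subst hc
    have hnil : PySem.List.sorted ([] : List (List (String × Int))) pvKey = [] := rfl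
    simp only [hnil, List.length_nil, Nat.cast_zero]
    rw [PySem.List.pyRange_one_eq_nil (by omega)]
    simp [PySem.List.slice_from_one, PySem.List.slice_toNat]
  · rw [if_neg hc]
    set s := PySem.List.sorted constants pvKey with hs
    have hsne : s ≠ [] := by
      rw [hs, Ne, PySem.List.sorted_eq_nil_iff]; exact hc
    have hlen : 1 ≤ s.length := List.length_pos_iff.mpr hsne
    simp only []
    rw [pvA_loop s t (PySem.List.pyRange 1 (s.length : Int) 1) [] [PySem.List.pyGetD s 0 []]]
    rw [PySem.List.slice_from_one]
    simp only [List.tail_cons]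
    have hbrk : (fun i => decide (pvKey (PySem.List.pyGetD s i []) -
        (pvKey (PySem.List.pyGetD s (i - 1) []) + pvSize (PySem.List.pyGetD s (i - 1) [])) > t))
        = pvBrk s t := rfl
    rw [hbrk]
    have hB := pvB_slices s t (s.length - 1) 0 1 (by omega) (by omega) (by push_cast; omega)
    have h01 : PySem.List.slice s (some 0) (some 1) = [PySem.List.pyGetD s 0 []] := by
      have := pvSlice_singleton s 0 (by omega) (by push_cast; omega)
      simpa using this
    rw [h01] at hB
    rw [hB]
    simp
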